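-- pv_equiv track=rewrite | github.com/sleepynoob/NNP | src/vm.py | sideBySideStrings
-- ===== SOURCE A (Python) =====
-- def sideBySideStrings(string1: str, string2: str) -> str:
--     """Place côte à côte 2 chaînes de caractères délimitées par le caractère \\n. Les chaines doivent terminer par \n.
--
--     Args:
--         string1 (str): Chaine de caractères
--         string2 (str): Chaine de caractères
--
--     Returns:
--         str: Les 2 chaines côtes à côtes
--     """
--     padding = 5
--
--     sidedStrings = "\n"
--
--     if not string2:
--         return sideBySideStrings(string1, sidedStrings)
--
--     if not string1:
--         return sideBySideStrings(sidedStrings, string2)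
--
--     l1 = string1.split("\n")[:-1]
--     l2 = string2.split("\n")[:-1]
--
--     if len(l2) > len(l1):
--         l1, l2 = l2, l1
--
--     l1.reverse()
--     l2.reverse()
--
--     l0 = []
--
--     maxLen = 0
--
--     for index, s2 in enumerate(l2):
--         s1 = l1[index]
--         totalLen = len(s1) + len(s2)
--         maxLen = totalLen if totalLen > maxLen else maxLen
--
--     for index, s2 in enumerate(l2):
--         s1 = l1[index]
--         s = f"{s1}{s2.rjust(maxLen-len(s1)+padding , ' ')}\n"
--         l0.append(s)
--
--     # l0 += "\n".join(l1[len(l2):])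
--     l0.reverse()
--     for s0 in l0:
--         sidedStrings += s0
--     subl1 = l1[len(l2) :]
--     subl1.reverse()
--     sidedStrings = "\n".join(subl1) + sidedStrings
--
--     return sidedStrings
-- ===== SOURCE B (Python) =====
-- def sideBySideStrings(string1: str, string2: str) -> str:
--     """Place side by side two '\n'-terminated multiline strings (bottom-aligned columns)."""
--     if not string2:
--         return sideBySideStrings(string1, "\n")
--     if not string1:
--         return sideBySideStrings("\n", string2)
--     a = string1.split("\n")[:-1]
--     b = string2.split("\n")[:-1]
--     if len(b) > len(a):
--         a, b = b, a
--     j = len(b) - len(a)  # signed offset of the short column relative to the long one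
--     # pass 1: W = total row width = padding + widest bottom-aligned combined pair
--     W = 5
--     for i, s in enumerate(a):
--         if j + i >= 0:
--             W = max(W, 5 + len(s) + len(b[j + i]))
--     # pass 2: one forward walk over the rows of the long column
--     rows = []
--     for i, s in enumerate(a):
--         if j + i < 0:
--             rows.append(s + "\n")
--         else:
--             t = b[j + i]
--             rows.append(s + " " * (W - len(s) - len(t)) + t + "\n")
--     # A emits the separator newline standalone when there is no overhang
--     return ("" if j < 0 else "\n") + "".join(rows)
-- ===== Notes on version B (the rewrite author's own statement) =====
-- stated objective: alternative
-- what changed: A's four list reversals, enumerate-with-index-lookup loops, += accumulation and tail slicing are replaced by a single forward merge-style walk over the rows of the longer column with a signed offset cursor into the shorter one, emitting overhang rows and padded pairs (explicit space runs instead of rjust) in one uniform loop joined front to back.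
import Mathlib
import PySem

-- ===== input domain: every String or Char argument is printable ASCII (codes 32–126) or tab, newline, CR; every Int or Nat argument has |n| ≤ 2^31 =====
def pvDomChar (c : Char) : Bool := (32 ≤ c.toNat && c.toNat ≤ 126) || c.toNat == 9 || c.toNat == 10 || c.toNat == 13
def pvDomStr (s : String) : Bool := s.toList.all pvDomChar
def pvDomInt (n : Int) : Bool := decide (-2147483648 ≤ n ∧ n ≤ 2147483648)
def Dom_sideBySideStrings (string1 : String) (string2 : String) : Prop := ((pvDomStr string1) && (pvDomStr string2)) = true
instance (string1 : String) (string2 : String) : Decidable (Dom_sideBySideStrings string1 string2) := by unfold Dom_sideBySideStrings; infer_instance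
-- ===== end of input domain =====

-- B replaces A's four reversals, index loops and += accumulation by a single forward merge-style
-- walk over the rows of the longer column with a signed offset into the shorter one; same value
-- everywhere (objective: alternative decomposition, same cost).

-- ===== PORT A =====
-- s.rjust(w, ' '): pad on the left with spaces up to width w (A's f-string)
def pvRjust (s : List Char) (w : Int) : List Char :=
  List.replicate (w - s.length).toNat ' ' ++ s

-- string.split("\n")[:-1] (the same line in both Pythons)
def pvLinesOf (s : List Char) : List (List Char) :=
  PySem.List.slice (PySem.Chars.splitOn s ['\n']) none (some (-1))

-- A's body after the swap (l2 is the shorter list); lets mirror A's locals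
def pvCoreA (l1 l2 : List (List Char)) : List Char :=
  let r1 := l1.reverse
  let r2 := l2.reverse
  let maxLen : Int := (PySem.List.enumerate r2).foldl
    (fun m p =>
      let s1 := (PySem.List.pyGet? r1 p.1).getD []   -- l1[index]: always in range (len l1 ≥ len l2)
      let totalLen : Int := s1.length + p.2.length
      if totalLen > m then totalLen else m) 0
  let l0 : List (List Char) := (PySem.List.enumerate r2).foldl
    (fun acc p =>
      let s1 := (PySem.List.pyGet? r1 p.1).getD []
      acc ++ [s1 ++ pvRjust p.2 (maxLen - (s1.length : Int) + 5) ++ ['\n']]) []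
  let sided := (l0.reverse).foldl (fun acc s0 => acc ++ s0) ['\n']
  let subl1 := (PySem.List.slice r1 (some (l2.length : Int)) none).reverse
  PySem.Chars.join ['\n'] subl1 ++ sided

-- A's ≤2-deep self-recursion (an empty argument is replaced by "\n") unfolded into the two ifs
def sideBySideStrings (string1 : String) (string2 : String) : String :=
  let cs2 := if string2.toList = [] then ['\n'] else string2.toList
  let cs1 := if string1.toList = [] then ['\n'] else string1.toList
  let l1 := pvLinesOf cs1
  let l2 := pvLinesOf cs2
  if l2.length > l1.length then String.ofList (pvCoreA l2 l1) else String.ofList (pvCoreA l1 l2)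

-- ===== PORT B =====
-- B's body after the swap: one forward walk over the rows of the long column a with the signed
-- offset j into the short column b; explicit space runs, no reversals, no rjust, no slices
def pvCoreB (a b : List (List Char)) : List Char :=
  let j : Int := (b.length : Int) - (a.length : Int)
  let W : Int := (PySem.List.enumerate a).foldl
    (fun W p =>
      if j + p.1 ≥ 0 then
        max W (5 + (p.2.length : Int) + (((PySem.List.pyGet? b (j + p.1)).getD []).length : Int))
      else W) 5
  let rows : List (List Char) := (PySem.List.enumerate a).foldl
    (fun out p =>
      if j + p.1 < 0 then out ++ [p.2 ++ ['\n']]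
      else
        let t := (PySem.List.pyGet? b (j + p.1)).getD []
        out ++ [p.2 ++ List.replicate (W - (p.2.length : Int) - (t.length : Int)).toNat ' ' ++ t ++ ['\n']])
    []
  (if j < 0 then [] else ['\n']) ++ rows.flatten

-- B's recursion on an empty argument, unfolded the same way
def sideBySideStrings_alt (string1 : String) (string2 : String) : String :=
  let cs2 := if string2.toList = [] then ['\n'] else string2.toList
  let cs1 := if string1.toList = [] then ['\n'] else string1.toList
  let l1 := pvLinesOf cs1
  let l2 := pvLinesOf cs2
  if l2.length > l1.length then String.ofList (pvCoreB l2 l1) else String.ofList (pvCoreB l1 l2)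

-- ===== PRECONDITION & SPEC =====
def Spec_sideBySideStrings (string1 : String) (string2 : String) (out : String) : Prop := out = sideBySideStrings_alt string1 string2
instance (string1 : String) (string2 : String) (out : String) : Decidable (Spec_sideBySideStrings string1 string2 out) := by unfold Spec_sideBySideStrings; infer_instance

-- ===== CLAIM (what is proved, stated in full; the proofs are below) =====
def Claim_equal_sideBySideStrings : Prop := ∀ (string1 : String) (string2 : String), Dom_sideBySideStrings string1 string2 → Spec_sideBySideStrings string1 string2 (sideBySideStrings string1 string2)

-- ===== LEMMAS AND PROOFS =====

-- the common normal form both cores are reduced to: leading unpaired lines of l1 joined,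
-- a newline, then the bottom-aligned pairs rendered left-to-right
def pvNF (l1 l2 : List (List Char)) : List Char :=
  let k := l1.length - l2.length
  let pairs := (l1.drop k).zip l2
  let maxLen : Int := pairs.foldl (fun m p => max m ((p.1.length : Int) + p.2.length)) 0
  let body := pairs.flatMap (fun p => p.1 ++ pvRjust p.2 (maxLen - (p.1.length : Int) + 5) ++ ['\n'])
  PySem.Chars.join ['\n'] (l1.take k) ++ ['\n'] ++ body

-- `if t > m then t else m` is `max m t`
theorem pv_if_max (m t : Int) : (if t > m then t else m) = max m t := by
  omega

-- pulling an element out of a `foldl max`-style fold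
theorem pv_foldl_maxf_out {β : Type} (f : β → Int) (l : List β) (a t : Int) :
    l.foldl (fun m x => max m (f x)) (max a t) = max (l.foldl (fun m x => max m (f x)) a) t := by
  induction l generalizing a with
  | nil => rfl
  | cons y l ih =>
      simp only [List.foldl_cons]
      rw [show max (max a t) (f y) = max (max a (f y)) t by omega, ih]

-- a `foldl max` fold is invariant under reversing the list
theorem pv_foldl_maxf_reverse {β : Type} (f : β → Int) (l : List β) (a : Int) :
    l.reverse.foldl (fun m x => max m (f x)) a = l.foldl (fun m x => max m (f x)) a := by
  induction l generalizing a with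
  | nil => rfl
  | cons y l ih =>
      simp only [List.reverse_cons, List.foldl_append, List.foldl_cons, List.foldl_nil, ih]
      rw [← pv_foldl_maxf_out f l a (f y)]

-- a constant shift commutes with a `foldl max` fold
theorem pv_foldl_maxf_shift {β : Type} (f : β → Int) (l : List β) (c a : Int) :
    l.foldl (fun m x => max m (c + f x)) (c + a) = c + l.foldl (fun m x => max m (f x)) a := by
  induction l generalizing a with
  | nil => rfl
  | cons y l ih =>
      simp only [List.foldl_cons]
      rw [show max (c + a) (c + f y) = c + max a (f y) by omega, ih]

-- the append-singleton accumulator loop is a map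
theorem pv_foldl_snoc {α β : Type} (f : α → β) (l : List α) (acc : List β) :
    l.foldl (fun a x => a ++ [f x]) acc = acc ++ l.map f := by
  induction l generalizing acc with
  | nil => simp
  | cons y l ih => simp [ih]

-- the string-concatenation accumulator loop is a flatten
theorem pv_foldl_flatten {α : Type} (l : List (List α)) (a : List α) :
    l.foldl (fun acc s => acc ++ s) a = a ++ l.flatten := by
  induction l generalizing a with
  | nil => simp
  | cons y l ih => simp [ih]

-- A's reversed, index-paired traversal produces exactly the reverse of the forward zip
theorem pv_pairs_eq (l1 l2 : List (List Char)) (h : l2.length ≤ l1.length) :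
    (PySem.List.enumerate l2.reverse).map
      (fun p => ((PySem.List.pyGet? l1.reverse p.1).getD [], p.2))
      = ((l1.drop (l1.length - l2.length)).zip l2).reverse := by
  apply List.ext_getElem
  · simp [PySem.List.length_enumerate]; omega
  · intro i h1 h2
    have hi : i < l2.length := by
      simpa [PySem.List.length_enumerate] using h1
    have hi1 : i < l1.length := lt_of_lt_of_le hi h
    simp only [List.getElem_map, PySem.List.getElem_enumerate, zero_add,
      PySem.List.pyGet?_natCast, List.getElem_reverse, List.getElem_zip, List.getElem_drop]
    rw [List.getElem?_eq_getElem (by simpa using hi1)]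
    simp only [Option.getD_some, List.getElem_reverse]
    have hlen : ((l1.drop (l1.length - l2.length)).zip l2).length = l2.length := by
      simp; omega
    congr 1
    · congr 1
      omega
    · congr 1
      omega

-- map over A's (index, line) pairs factors through the pair list
theorem pv_map_pair {β : Type} (r1 : List (List Char)) (g : List Char × List Char → β) (l : List (Int × List Char)) :
    l.map (fun p => g ((PySem.List.pyGet? r1 p.1).getD [], p.2))
      = (l.map (fun p => ((PySem.List.pyGet? r1 p.1).getD [], p.2))).map g := by
  rw [List.map_map]
  rfl

-- A's core reduces to the normal form
theorem pv_coreA_eq_nf (l1 l2 : List (List Char)) (h : l2.length ≤ l1.length) :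
    pvCoreA l1 l2 = pvNF l1 l2 := by
  have hmap : (PySem.List.enumerate l2.reverse).map
      (fun p => ((PySem.List.pyGet? l1.reverse p.1).getD [], p.2))
      = ((l1.drop (l1.length - l2.length)).zip l2).reverse := pv_pairs_eq l1 l2 h
  have hmax : List.foldl
      (fun (m : Int) (p : Int × List Char) =>
        if (((PySem.List.pyGet? l1.reverse p.1).getD []).length : Int) + ((p.2.length : Nat) : Int) > m then
          (((PySem.List.pyGet? l1.reverse p.1).getD []).length : Int) + ((p.2.length : Nat) : Int)
        else m) 0 (PySem.List.enumerate l2.reverse)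
      = List.foldl (fun (m : Int) (p : List Char × List Char) => max m ((p.1.length : Int) + (p.2.length : Int))) 0
          ((l1.drop (l1.length - l2.length)).zip l2) := by
    rw [← pv_foldl_maxf_reverse (fun p : List Char × List Char => ((p.1.length : Int) + (p.2.length : Int)))]
    rw [← hmap, List.foldl_map]
    simp only [pv_if_max]
  simp only [pvCoreA, pvNF, hmax]
  set M : Int := List.foldl (fun (m : Int) (p : List Char × List Char) => max m (↑p.1.length + ↑p.2.length)) 0
      ((l1.drop (l1.length - l2.length)).zip l2) with hM
  have hl0 : List.foldl
      (fun (acc : List (List Char)) (p : Int × List Char) =>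
        acc ++ [(PySem.List.pyGet? l1.reverse p.1).getD [] ++
          pvRjust p.2 (M - ↑((PySem.List.pyGet? l1.reverse p.1).getD []).length + 5) ++ ['\n']])
      [] (PySem.List.enumerate l2.reverse)
      = (((l1.drop (l1.length - l2.length)).zip l2).map
          (fun q => q.1 ++ pvRjust q.2 (M - ↑q.1.length + 5) ++ ['\n'])).reverse := by
    rw [pv_foldl_snoc (fun p : Int × List Char =>
        (PySem.List.pyGet? l1.reverse p.1).getD [] ++
          pvRjust p.2 (M - ↑((PySem.List.pyGet? l1.reverse p.1).getD []).length + 5) ++ ['\n'])]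
    rw [List.nil_append]
    rw [pv_map_pair l1.reverse
        (fun q : List Char × List Char => q.1 ++ pvRjust q.2 (M - ↑q.1.length + 5) ++ ['\n'])]
    rw [hmap]
    rw [List.map_reverse]
  rw [hl0, List.reverse_reverse, pv_foldl_flatten]
  rw [PySem.List.slice_from l1.reverse (by exact_mod_cast Int.natCast_nonneg l2.length)]
  rw [Int.toNat_natCast, List.drop_reverse, List.reverse_reverse]
  rw [← List.flatMap_def]
  simp [List.append_assoc]

-- splitting B's enumeration at the overhang boundary k
theorem pv_enum_split (a : List (List Char)) (k : Nat) (hk : k ≤ a.length) :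
    PySem.List.enumerate a = PySem.List.enumerate (a.take k) ++ PySem.List.enumerate (a.drop k) k := by
  conv_lhs => rw [← List.take_append_drop k a]
  rw [PySem.List.enumerate_append]
  congr 2
  simp [Nat.min_eq_left hk]

-- the offset lookups along the dropped tail are exactly the forward zip with b
theorem pv_tail_zip (a b : List (List Char)) (h : b.length ≤ a.length) :
    (PySem.List.enumerate (a.drop (a.length - b.length)) ((a.length - b.length : Nat) : Int)).map
      (fun p => (p.2, (PySem.List.pyGet? b (((b.length : Int) - (a.length : Int)) + p.1)).getD []))
      = (a.drop (a.length - b.length)).zip b := by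
  apply List.ext_getElem
  · simp [PySem.List.length_enumerate]; omega
  · intro i h1 h2
    have hi : i < b.length := by
      have := h2; simp at this; omega
    simp only [List.getElem_map, PySem.List.getElem_enumerate, List.getElem_zip]
    have hidx : ((b.length : Int) - (a.length : Int)) + (((a.length - b.length : Nat) : Int) + (i : Nat)) = ((i : Nat) : Int) := by
      omega
    rw [hidx, PySem.List.pyGet?_natCast, List.getElem?_eq_getElem hi]
    simp

-- a fold whose step ignores its element is the identity
theorem pv_foldl_id {α β : Type} (l : List α) (c : β) :
    l.foldl (fun acc _ => acc) c = c := by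
  induction l with
  | nil => rfl
  | cons y l ih => exact ih

-- mapping a function of the second component over an enumeration
theorem pv_map_snd_enum {α β : Type} (f : α → β) (l : List α) (s : Int) :
    (PySem.List.enumerate l s).map (fun p => f p.2) = l.map f := by
  rw [show (fun p : Int × α => f p.2) = f ∘ (fun p : Int × α => p.2) from rfl]
  rw [← List.map_map, PySem.List.map_snd_enumerate]

-- terminated lines are the '\n'-join followed by a final '\n' (for a nonempty list)
theorem pv_flatten_terminated (xs : List (List Char)) (hne : xs ≠ []) :
    (xs.map (fun s => s ++ ['\n'])).flatten = PySem.Chars.join ['\n'] xs ++ ['\n'] := by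
  induction xs with
  | nil => exact absurd rfl hne
  | cons x t ih =>
      cases t with
      | nil => simp [PySem.Chars.join_singleton]
      | cons y u =>
          rw [List.map_cons, List.flatten_cons, ih (by simp), PySem.Chars.join_cons_cons]
          simp [List.append_assoc]

-- B's core reduces to the same normal form
theorem pv_coreB_eq_nf (a b : List (List Char)) (h : b.length ≤ a.length) :
    pvCoreB a b = pvNF a b := by
  simp only [pvCoreB, pvNF]
  set k : Nat := a.length - b.length with hk
  have hkle : k ≤ a.length := by omega
  set j : Int := (b.length : Int) - (a.length : Int) with hj
  have hjk : j = -(k : Int) := by rw [hj, hk]; omega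
  have hsplit := pv_enum_split a k hkle
  have hmem_pre : ∀ p ∈ PySem.List.enumerate (a.take k), j + p.1 < 0 ∧ ¬ (j + p.1 ≥ 0) := by
    intro p hp
    rcases (PySem.List.mem_enumerate_iff _ _ _).1 hp with ⟨m, hm, rfl⟩
    have hmk : m < k := by simp at hm; omega
    refine ⟨?_, ?_⟩ <;> simp [hjk] <;> omega
  have hmem_tail : ∀ p ∈ PySem.List.enumerate (a.drop k) (k : Int), (j + p.1 ≥ 0) ∧ ¬ (j + p.1 < 0) := by
    intro p hp
    rcases (PySem.List.mem_enumerate_iff _ _ _).1 hp with ⟨m, hm, rfl⟩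
    refine ⟨?_, ?_⟩ <;> simp [hjk]
  have hz : (PySem.List.enumerate (a.drop k) (k : Int)).map
      (fun p => (p.2, (PySem.List.pyGet? b (j + p.1)).getD [])) = (a.drop k).zip b := by
    have := pv_tail_zip a b h
    rw [← hk, ← hj] at this
    exact this
  set M : Int := ((a.drop k).zip b).foldl (fun m p => max m ((p.1.length : Int) + p.2.length)) 0 with hM
  -- the width pass: identity on the prefix, the zip maximum (shifted by the padding 5) on the tail
  have hW : (PySem.List.enumerate a).foldl
      (fun W p =>
        if j + p.1 ≥ 0 then
          max W (5 + (p.2.length : Int) + (((PySem.List.pyGet? b (j + p.1)).getD []).length : Int))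
        else W) 5 = 5 + M := by
    rw [hsplit, List.foldl_append]
    rw [PySem.List.foldl_congr_mem (PySem.List.enumerate (a.take k))
        (fun W p =>
          if j + p.1 ≥ 0 then
            max W (5 + (p.2.length : Int) + (((PySem.List.pyGet? b (j + p.1)).getD []).length : Int))
          else W)
        (fun acc _ => acc) 5
        (fun acc x hx => if_neg (hmem_pre x hx).2)]
    rw [pv_foldl_id]
    rw [PySem.List.foldl_congr_mem (PySem.List.enumerate (a.drop k) (k : Int))
        (fun W p =>
          if j + p.1 ≥ 0 then
            max W (5 + (p.2.length : Int) + (((PySem.List.pyGet? b (j + p.1)).getD []).length : Int))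
          else W)
        (fun W p =>
          max W (5 + (((p.2.length : Int)) + (((PySem.List.pyGet? b (j + p.1)).getD []).length : Int))))
        5
        (fun acc x hx => by beta_reduce; rw [if_pos (hmem_tail x hx).1]; omega)]
    calc (PySem.List.enumerate (a.drop k) (k : Int)).foldl
          (fun W p =>
            max W (5 + (((p.2.length : Int)) + (((PySem.List.pyGet? b (j + p.1)).getD []).length : Int)))) 5
        = ((PySem.List.enumerate (a.drop k) (k : Int)).map
            (fun p => (p.2, (PySem.List.pyGet? b (j + p.1)).getD []))).foldl
            (fun acc q => max acc (5 + ((q.1.length : Int) + (q.2.length : Int)))) 5 := by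
          rw [List.foldl_map]
      _ = ((a.drop k).zip b).foldl
            (fun acc q => max acc (5 + ((q.1.length : Int) + (q.2.length : Int)))) 5 := by
          rw [hz]
      _ = 5 + M := by
          rw [hM]
          simpa using pv_foldl_maxf_shift
            (fun q : List Char × List Char => (q.1.length : Int) + q.2.length) ((a.drop k).zip b) 5 0
  rw [hW]
  -- the row pass: raw lines on the prefix, padded pairs on the tail
  have hrows : (PySem.List.enumerate a).foldl
      (fun out p =>
        if j + p.1 < 0 then out ++ [p.2 ++ ['\n']]
        else
          let t := (PySem.List.pyGet? b (j + p.1)).getD []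
          out ++ [p.2 ++ List.replicate (5 + M - (p.2.length : Int) - (t.length : Int)).toNat ' ' ++ t ++ ['\n']])
      []
      = (a.take k).map (fun s => s ++ ['\n'])
        ++ ((a.drop k).zip b).map
            (fun q => q.1 ++ List.replicate (5 + M - (q.1.length : Int) - (q.2.length : Int)).toNat ' ' ++ q.2 ++ ['\n']) := by
    rw [hsplit, List.foldl_append]
    rw [PySem.List.foldl_congr_mem (PySem.List.enumerate (a.take k))
        (fun out p =>
          if j + p.1 < 0 then out ++ [p.2 ++ ['\n']]
          else
            let t := (PySem.List.pyGet? b (j + p.1)).getD []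
            out ++ [p.2 ++ List.replicate (5 + M - (p.2.length : Int) - (t.length : Int)).toNat ' ' ++ t ++ ['\n']])
        (fun out p => out ++ [p.2 ++ ['\n']]) []
        (fun acc x hx => if_pos (hmem_pre x hx).1)]
    rw [pv_foldl_snoc (fun p : Int × List Char => p.2 ++ ['\n']), List.nil_append]
    rw [pv_map_snd_enum (fun s => s ++ ['\n'])]
    rw [PySem.List.foldl_congr_mem (PySem.List.enumerate (a.drop k) (k : Int))
        (fun out p =>
          if j + p.1 < 0 then out ++ [p.2 ++ ['\n']]
          else
            let t := (PySem.List.pyGet? b (j + p.1)).getD []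
            out ++ [p.2 ++ List.replicate (5 + M - (p.2.length : Int) - (t.length : Int)).toNat ' ' ++ t ++ ['\n']])
        (fun out p =>
          out ++ [p.2 ++ List.replicate (5 + M - (p.2.length : Int)
              - ((((PySem.List.pyGet? b (j + p.1)).getD []).length : Nat) : Int)).toNat ' '
            ++ (PySem.List.pyGet? b (j + p.1)).getD [] ++ ['\n']])
        _
        (fun acc x hx => by beta_reduce; rw [if_neg (hmem_tail x hx).2])]
    rw [pv_foldl_snoc (fun p : Int × List Char =>
          p.2 ++ List.replicate (5 + M - (p.2.length : Int)
              - ((((PySem.List.pyGet? b (j + p.1)).getD []).length : Nat) : Int)).toNat ' '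
            ++ (PySem.List.pyGet? b (j + p.1)).getD [] ++ ['\n'])]
    congr 1
    calc (PySem.List.enumerate (a.drop k) (k : Int)).map
          (fun p => p.2 ++ List.replicate (5 + M - (p.2.length : Int)
              - ((((PySem.List.pyGet? b (j + p.1)).getD []).length : Nat) : Int)).toNat ' '
            ++ (PySem.List.pyGet? b (j + p.1)).getD [] ++ ['\n'])
        = ((PySem.List.enumerate (a.drop k) (k : Int)).map
            (fun p => (p.2, (PySem.List.pyGet? b (j + p.1)).getD []))).map
            (fun q => q.1 ++ List.replicate (5 + M - (q.1.length : Int) - (q.2.length : Int)).toNat ' ' ++ q.2 ++ ['\n']) := by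
          rw [List.map_map]
          rfl
      _ = _ := by rw [hz]
  rw [hrows, List.flatten_append]
  -- padded pairs flatten to the rjust body
  have hbody : (((a.drop k).zip b).map
      (fun q => q.1 ++ List.replicate (5 + M - (q.1.length : Int) - (q.2.length : Int)).toNat ' ' ++ q.2 ++ ['\n'])).flatten
      = ((a.drop k).zip b).flatMap (fun p => p.1 ++ pvRjust p.2 (M - (p.1.length : Int) + 5) ++ ['\n']) := by
    rw [← List.flatMap_def]
    congr 1
    funext q
    have hc : 5 + M - (q.1.length : Int) - (q.2.length : Int)
        = (M - (q.1.length : Int) + 5) - (q.2.length : Int) := by ring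
    rw [hc]
    simp [pvRjust, List.append_assoc]
  rw [hbody]
  -- assemble the head: standalone newline iff there is no overhang
  by_cases hk0 : k = 0
  · have hjn : ¬ j < 0 := by rw [hjk, hk0]; simp
    rw [if_neg hjn, hk0]
    simp [PySem.Chars.join_nil]
  · have hjy : j < 0 := by rw [hjk]; omega
    have htk : a.take k ≠ [] := by
      intro hnil
      apply hk0
      rcases List.take_eq_nil_iff.1 hnil with h0 | h0
      · exact h0
      · rw [hk, h0]; simp
    rw [if_pos hjy, List.nil_append, pv_flatten_terminated (a.take k) htk]

-- ===== VERDICT (by name: the statement is the Claim_ definition above) =====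
theorem sideBySideStrings_spec : Claim_equal_sideBySideStrings := by
  intro string1 string2 _
  unfold Spec_sideBySideStrings sideBySideStrings sideBySideStrings_alt
  by_cases hg :
      (pvLinesOf (if string2.toList = [] then ['\n'] else string2.toList)).length >
        (pvLinesOf (if string1.toList = [] then ['\n'] else string1.toList)).length
  · rw [if_pos hg, if_pos hg, pv_coreA_eq_nf _ _ (le_of_lt hg), pv_coreB_eq_nf _ _ (le_of_lt hg)]
  · rw [if_neg hg, if_neg hg, pv_coreA_eq_nf _ _ (by omega), pv_coreB_eq_nf _ _ (by omega)]
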